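-- pv_equiv track=rewrite | github.com/enradpop/LoxInterpreterCPP | tool/GenerateAst.py | defineType
-- ===== SOURCE A (Python) =====
-- from enum import Enum
--
-- class TokenType(Enum):
--     TOKEN = 1
--     EXPR = 2
--
-- def defineType(baseName, className, fieldList):
--     writer = f"template <typename R> class {className}: public {baseName} {{\npublic:\n"
--     #constructor
--     fields = fieldList.split(", ")
--     writer += f"\t{className}("
--     for field in fields:
--         type, name = getTypeAndName(field)
--         if whatType(type) == TokenType.TOKEN:
--             type = f"{type} const&"
--         else:
--             type = f"{type}*"
--         writer += f"{type} {name}, "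
--     writer = writer[:-2]
--     writer += f"): "
--     for field in fields:
--         type, name = getTypeAndName(field)
--         writer += f"{name}({name}), "
--     writer = writer[:-2]
--     writer += f"\n\t{{}}\n\n"
--     #destructor
--     writer += f"\t~{className}() override {{}}\n\n"
--     #fields
--     writer += "\tR accept(Visitor<R> const& visitor) override {\n"
--     writer += f"\t\treturn visitor.visit{className}{baseName[:-3]}(*this);\n"
--     writer += "\t}\n\n"
--     for field in fields:
--         type, name = getTypeAndName(field)
--         if whatType(type) == TokenType.EXPR:
--             type = f"std::unique_ptr<{type}>"
--         writer += f"\t{type} {name};\n"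
--     writer += f"}};\n"
--     return writer.expandtabs(4)
--
-- def getTypeAndName(field):
--     type = field.split(" ")[0]
--     name = field.split(" ")[1]
--     return type, name
--
-- def whatType(type):
--     if(type == "Token"):
--         return TokenType.TOKEN
--     return TokenType.EXPR
-- ===== SOURCE B (Python) =====
-- from enum import Enum
--
-- class TokenType(Enum):
--     TOKEN = 1
--     EXPR = 2
--
-- def getTypeAndName(field):
--     type = field.split(" ")[0]
--     name = field.split(" ")[1]
--     return type, name
--
-- def whatType(type):
--     if(type == "Token"):
--         return TokenType.TOKEN
--     return TokenType.EXPR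
--
-- def defineType(baseName, className, fieldList):
--     params, inits, decls = [], [], []
--     for field in fieldList.split(", "):
--         type, name = getTypeAndName(field)
--         if whatType(type) == TokenType.TOKEN:
--             params.append(f"{type} const& {name}")
--         else:
--             params.append(f"{type}* {name}")
--         inits.append(f"{name}({name})")
--         if whatType(type) == TokenType.EXPR:
--             decls.append(f"\tstd::unique_ptr<{type}> {name};\n")
--         else:
--             decls.append(f"\t{type} {name};\n")
--     writer = (
--         f"template <typename R> class {className}: public {baseName} {{\npublic:\n"
--         f"\t{className}({', '.join(params)}): {', '.join(inits)}\n\t{{}}\n\n"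
--         f"\t~{className}() override {{}}\n\n"
--         "\tR accept(Visitor<R> const& visitor) override {\n"
--         f"\t\treturn visitor.visit{className}{baseName[:-3]}(*this);\n"
--         "\t}\n\n"
--         f"{''.join(decls)}}};\n"
--     )
--     return writer.expandtabs(4)
-- ===== Notes on version B (the rewrite author's own statement) =====
-- stated objective: simpler
-- what changed: B replaces A's three separate writer-appending loops and the two writer[:-2] back-trims by a single pass that collects the parameter, initializer and member-declaration strings into three lists and then assembles the result once with ', '.join / ''.join.
import Mathlib
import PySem

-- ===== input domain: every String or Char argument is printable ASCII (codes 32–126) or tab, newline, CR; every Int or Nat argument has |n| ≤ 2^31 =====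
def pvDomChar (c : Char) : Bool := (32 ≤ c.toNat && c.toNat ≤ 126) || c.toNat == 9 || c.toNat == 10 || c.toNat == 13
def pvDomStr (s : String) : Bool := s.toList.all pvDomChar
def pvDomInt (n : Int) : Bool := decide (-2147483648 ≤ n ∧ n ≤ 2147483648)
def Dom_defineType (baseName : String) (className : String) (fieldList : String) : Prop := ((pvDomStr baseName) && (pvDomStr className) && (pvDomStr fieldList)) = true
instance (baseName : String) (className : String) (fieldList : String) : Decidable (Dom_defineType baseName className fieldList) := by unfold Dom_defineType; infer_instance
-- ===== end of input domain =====

-- B replaces A's three writer-appending loops plus the two writer[:-2] trims by ONE pass that collects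
-- params/inits/decls into three lists, then joins them; equality of return values is proved below.

-- ===== PORT A =====
-- shared module helpers (used by both Pythons)
inductive TokenType where
  | TOKEN
  | EXPR
deriving DecidableEq

def whatType (t : List Char) : TokenType :=
  if t = "Token".toList then TokenType.TOKEN else TokenType.EXPR

-- field.split(" ")[0/1]; index 1 raises IndexError in Python when the field has no space —
-- excluded by Pre_defineType, pyGetD's default is never read inside Pre_.
def getTypeAndName (f : List Char) : List Char × List Char :=
  (PySem.List.pyGetD (PySem.Chars.splitOn f " ".toList) 0 [],
   PySem.List.pyGetD (PySem.Chars.splitOn f " ".toList) 1 [])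

-- hand port of str.expandtabs(4) (not in PySem): column counter mod 4; '\n' and '\r' reset it,
-- a tab appends 4 - col % 4 spaces; exact for tabsize 4.
def expandTabs4Go : List Char → Nat → List Char
  | [], _ => []
  | ch :: rest, col =>
    if ch = '\t' then List.replicate (4 - col % 4) ' ' ++ expandTabs4Go rest 0
    else if ch = '\n' ∨ ch = '\r' then ch :: expandTabs4Go rest 0
    else ch :: expandTabs4Go rest ((col + 1) % 4)

def expandTabs4 (cs : List Char) : List Char := expandTabs4Go cs 0

def defineType (baseName : String) (className : String) (fieldList : String) : String :=
  let b := baseName.toList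
  let c := className.toList
  let writer := "template <typename R> class ".toList ++ c ++ ": public ".toList ++ b ++ " {\npublic:\n".toList
  let fields := PySem.Chars.splitOn fieldList.toList ", ".toList
  let writer := writer ++ ("\t".toList ++ c ++ "(".toList)
  let writer := fields.foldl (fun w f =>
    let t := (getTypeAndName f).1
    let n := (getTypeAndName f).2
    let t := if whatType t = TokenType.TOKEN then t ++ " const&".toList else t ++ "*".toList
    w ++ (t ++ " ".toList ++ n ++ ", ".toList)) writer
  let writer := PySem.List.slice writer none (some (-2))
  let writer := writer ++ "): ".toList
  let writer := fields.foldl (fun w f =>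
    let n := (getTypeAndName f).2
    w ++ (n ++ "(".toList ++ n ++ "), ".toList)) writer
  let writer := PySem.List.slice writer none (some (-2))
  let writer := writer ++ "\n\t{}\n\n".toList
  let writer := writer ++ ("\t~".toList ++ c ++ "() override {}\n\n".toList)
  let writer := writer ++ "\tR accept(Visitor<R> const& visitor) override {\n".toList
  let writer := writer ++ ("\t\treturn visitor.visit".toList ++ c ++ PySem.List.slice b none (some (-3)) ++ "(*this);\n".toList)
  let writer := writer ++ "\t}\n\n".toList
  let writer := fields.foldl (fun w f =>
    let t := (getTypeAndName f).1
    let n := (getTypeAndName f).2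
    let t := if whatType t = TokenType.EXPR then "std::unique_ptr<".toList ++ t ++ ">".toList else t
    w ++ ("\t".toList ++ t ++ " ".toList ++ n ++ ";\n".toList)) writer
  let writer := writer ++ "};\n".toList
  String.ofList (expandTabs4 writer)

-- ===== PORT B =====
-- the three per-field pieces B's single loop appends
def fieldPieces (f : List Char) : List Char × List Char × List Char :=
  let t := (getTypeAndName f).1
  let n := (getTypeAndName f).2
  ((if whatType t = TokenType.TOKEN then t ++ " const& ".toList ++ n else t ++ "* ".toList ++ n),
   n ++ "(".toList ++ n ++ ")".toList,
   (if whatType t = TokenType.EXPR then "\tstd::unique_ptr<".toList ++ t ++ "> ".toList ++ n ++ ";\n".toList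
    else "\t".toList ++ t ++ " ".toList ++ n ++ ";\n".toList))

def defineType_alt (baseName : String) (className : String) (fieldList : String) : String :=
  let b := baseName.toList
  let c := className.toList
  let fields := PySem.Chars.splitOn fieldList.toList ", ".toList
  let acc := fields.foldl
    (fun (acc : List (List Char) × List (List Char) × List (List Char)) f =>
      (acc.1 ++ [(fieldPieces f).1], acc.2.1 ++ [(fieldPieces f).2.1], acc.2.2 ++ [(fieldPieces f).2.2]))
    ([], [], [])
  let writer :=
    "template <typename R> class ".toList ++ c ++ ": public ".toList ++ b ++ " {\npublic:\n".toList
    ++ ("\t".toList ++ c ++ "(".toList) ++ PySem.Chars.join ", ".toList acc.1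
    ++ "): ".toList ++ PySem.Chars.join ", ".toList acc.2.1
    ++ "\n\t{}\n\n".toList
    ++ ("\t~".toList ++ c ++ "() override {}\n\n".toList)
    ++ "\tR accept(Visitor<R> const& visitor) override {\n".toList
    ++ ("\t\treturn visitor.visit".toList ++ c ++ PySem.List.slice b none (some (-3)) ++ "(*this);\n".toList)
    ++ "\t}\n\n".toList
    ++ PySem.Chars.join [] acc.2.2 ++ "};\n".toList
  String.ofList (expandTabs4 writer)

-- ===== PRECONDITION & SPEC =====
-- Pre_ excludes exactly the inputs on which Python A raises IndexError: a field (a ", "-separated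
-- piece of fieldList) whose split on " " has no second element, i.e. a field with no space in it.
def Pre_defineType (baseName : String) (className : String) (fieldList : String) : Prop :=
  ∀ f ∈ PySem.Chars.splitOn fieldList.toList ", ".toList,
    PySem.Raise.InRange (PySem.Chars.splitOn f " ".toList).length 1
instance (baseName : String) (className : String) (fieldList : String) : Decidable (Pre_defineType baseName className fieldList) := by unfold Pre_defineType; infer_instance

def pvWitness_defineType : String × String × String :=
  ("Expr", "Binary", "Expr left, Token operator, Expr right")

def Spec_defineType (baseName : String) (className : String) (fieldList : String) (out : String) : Prop := out = defineType_alt baseName className fieldList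
instance (baseName : String) (className : String) (fieldList : String) (out : String) : Decidable (Spec_defineType baseName className fieldList out) := by unfold Spec_defineType; infer_instance

-- ===== CLAIM (what is proved, stated in full; the proofs are below) =====
def Claim_equal_defineType : Prop := ∀ (baseName : String) (className : String) (fieldList : String), Dom_defineType baseName className fieldList → Pre_defineType baseName className fieldList → Spec_defineType baseName className fieldList (defineType baseName className fieldList)

-- ===== LEMMAS AND PROOFS =====

theorem splitOn_go_ne_nil (sep : List Char) (fuel : Nat) :
    ∀ (l cur : List Char) (acc : List (List Char)),
      PySem.Chars.splitOn.go sep fuel l cur acc ≠ [] := by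
  induction fuel with
  | zero => intro l cur acc; simp [PySem.Chars.splitOn.go]
  | succ n ih =>
    intro l cur acc
    cases l with
    | nil => simp [PySem.Chars.splitOn.go]
    | cons ch rest =>
      rw [PySem.Chars.splitOn.go]
      split
      · exact ih _ _ _
      · exact ih _ _ _

theorem splitOn_ne_nil (s sep : List Char) : PySem.Chars.splitOn s sep ≠ [] := by
  unfold PySem.Chars.splitOn
  exact splitOn_go_ne_nil _ _ _ _ _

theorem foldl_three_lists {α : Type} (P Q R : α → List Char) :
    ∀ (fs : List α) (ps qs rs : List (List Char)),
      fs.foldl (fun (acc : List (List Char) × List (List Char) × List (List Char)) f =>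
        (acc.1 ++ [P f], acc.2.1 ++ [Q f], acc.2.2 ++ [R f])) (ps, qs, rs)
      = (ps ++ fs.map P, qs ++ fs.map Q, rs ++ fs.map R) := by
  intro fs
  induction fs with
  | nil => simp
  | cons f rest ih => intro ps qs rs; simp [List.foldl_cons, ih]

theorem flatMap_chunks {α : Type} (g : α → List Char) (sep : List Char) :
    ∀ (fs : List α), fs ≠ [] →
      fs.flatMap (fun f => g f ++ sep) = PySem.Chars.join sep (fs.map g) ++ sep := by
  intro fs
  induction fs with
  | nil => intro h; exact absurd rfl h
  | cons f rest ih =>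
    intro _
    cases rest with
    | nil => simp [PySem.Chars.join_singleton]
    | cons f2 r2 =>
      rw [List.flatMap_cons, ih (by simp)]
      simp [PySem.Chars.join_cons_cons, List.append_assoc]

theorem join_nil_eq_flatMap {α : Type} (g : α → List Char) :
    ∀ (fs : List α), PySem.Chars.join [] (fs.map g) = fs.flatMap g := by
  intro fs
  induction fs with
  | nil => rfl
  | cons f rest ih =>
    cases rest with
    | nil => simp [PySem.Chars.join_singleton]
    | cons f2 r2 =>
      rw [List.map_cons, List.map_cons, PySem.Chars.join_cons_cons, List.flatMap_cons,
        ← List.map_cons, ih]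
      simp

theorem slice_drop2 (w : List Char) :
    PySem.List.slice (w ++ ", ".toList) none (some (-2)) = w := by
  have h2 : (-2 : Int) = -((2 : Nat) : Int) := by norm_num
  rw [h2, PySem.List.slice_to_neg_natCast _ 2 (by norm_num)]
  have hl : (", ".toList : List Char).length = 2 := rfl
  rw [List.length_append, hl, Nat.add_sub_cancel, List.take_left]


theorem p1eq (f : List Char) :
    ((if whatType (getTypeAndName f).1 = TokenType.TOKEN then (getTypeAndName f).1 ++ " const&".toList
      else (getTypeAndName f).1 ++ "*".toList) ++ " ".toList ++ (getTypeAndName f).2)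
    = (fieldPieces f).1 := by
  simp only [fieldPieces]
  split_ifs <;> (simp only [List.append_assoc]; try rfl)

theorem i1eq (f : List Char) :
    ((getTypeAndName f).2 ++ "(".toList ++ (getTypeAndName f).2 ++ ")".toList)
    = (fieldPieces f).2.1 := by
  simp only [fieldPieces]

theorem d1eq (f : List Char) :
    ("\t".toList ++ (if whatType (getTypeAndName f).1 = TokenType.EXPR then
        "std::unique_ptr<".toList ++ (getTypeAndName f).1 ++ ">".toList else (getTypeAndName f).1)
      ++ " ".toList ++ (getTypeAndName f).2 ++ ";\n".toList)
    = (fieldPieces f).2.2 := by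
  simp only [fieldPieces]
  split_ifs <;> (simp only [List.append_assoc]; try rfl)

-- ===== VERDICT (by name: the statement is the Claim_ definition above) =====
theorem defineType_spec : Claim_equal_defineType := by
  intro baseName className fieldList _ _
  simp only [Spec_defineType, defineType, defineType_alt]
  rw [foldl_three_lists]
  simp only [List.nil_append]
  have hne : PySem.Chars.splitOn fieldList.toList ", ".toList ≠ [] := splitOn_ne_nil _ _
  have h2 : ∀ (x : List Char), x ++ "), ".toList = (x ++ ")".toList) ++ ", ".toList := by
    intro x; simp only [List.append_assoc]; rfl
  simp only [h2]
  rw [PySem.List.foldl_append_eq_flatMap, PySem.List.foldl_append_eq_flatMap,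
    PySem.List.foldl_append_eq_flatMap]
  rw [flatMap_chunks _ _ _ hne, flatMap_chunks _ _ _ hne]
  have hre : ∀ (w x : List Char), w ++ (x ++ ", ".toList) = (w ++ x) ++ ", ".toList := by
    intro w x; rw [List.append_assoc]
  simp only [hre, slice_drop2]
  rw [join_nil_eq_flatMap]
  simp only [p1eq, i1eq, d1eq]
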